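-- pv_equiv track=rewrite | github.com/sumitasok/references | python/hackerrank/codality_sample.py | solution
-- ===== SOURCE A (Python) =====
-- def ensure_non_zero(x):
--     if x == 0:
--         return 1
--     return x
--
-- def solution(A):
--     # write your code in Python 3.6
--     a = sorted(A)
--
--     for i, x in enumerate(a):
--         if i == len(a) - 1:
--             return ensure_non_zero(x + 1)
--         if x <= 0:
--             continue
--         if x == a[i + 1]:
--             continue
--         xp = x + 1
--         if xp != a[i + 1]:
--             return ensure_non_zero(x + 1)
--     return ensure_non_zero(a[-1] + 1)
-- ===== SOURCE B (Python) =====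
-- def solution(A):
--     s = set(A)
--     cands = [x + 1 for x in A if x > 0 and x + 1 not in s]
--     if cands:
--         return min(cands)
--     m = max(A) + 1
--     return 1 if m == 0 else m
-- ===== Notes on version B (the rewrite author's own statement) =====
-- stated objective: alternative
-- what changed: A sorts the list and scans adjacent pairs for the first positive element whose successor is missing; B builds a set once and takes the minimum of {x+1 : x in A, x>0, x+1 not in A}, falling back to max(A)+1 (ensured nonzero), with no sort (O(n) vs O(n log n), though not measurably >=1.5x faster at tested sizes).
-- outside the precondition, e.g. on solution([]): A raises IndexError, B raises ValueError
import Mathlib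
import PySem

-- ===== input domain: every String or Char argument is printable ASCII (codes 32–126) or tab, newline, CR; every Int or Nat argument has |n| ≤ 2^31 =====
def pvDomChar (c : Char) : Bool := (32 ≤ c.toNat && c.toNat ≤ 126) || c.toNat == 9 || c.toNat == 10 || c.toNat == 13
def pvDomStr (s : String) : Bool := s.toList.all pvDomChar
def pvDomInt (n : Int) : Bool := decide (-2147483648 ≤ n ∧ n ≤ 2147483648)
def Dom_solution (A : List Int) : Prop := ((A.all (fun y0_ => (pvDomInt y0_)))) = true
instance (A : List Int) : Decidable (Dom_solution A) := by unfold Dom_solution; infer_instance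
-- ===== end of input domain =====

-- B replaces A's sort-and-scan-of-adjacent-pairs with a single set-membership pass: min positive x with x+1 absent, else max+1.


-- ===== PORT A =====
def ensureNonZero (x : Int) : Int := if x = 0 then 1 else x

-- the 'for i, x in enumerate(a)' loop: '[x]' is 'i == len(a) - 1', 'y' is 'a[i + 1]'; none = loop fell through
def solGo : List Int → Option Int
  | [] => none
  | [x] => some (ensureNonZero (x + 1))
  | x :: y :: rest =>
    if x ≤ 0 then solGo (y :: rest)
    else if x = y then solGo (y :: rest)
    else if x + 1 ≠ y then some (ensureNonZero (x + 1))
    else solGo (y :: rest)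

def solution (A : List Int) : Int :=
  let a := PySem.List.sorted A (fun x => x) false
  match solGo a with
  | some r => r
  | none => ensureNonZero (((PySem.List.pyGet? a (-1)).getD 0) + 1)  -- a[-1]: IndexError on [] (excluded by Pre_)

-- ===== PORT B =====
def solution_alt (A : List Int) : Int :=
  let s := PySem.Set.ofList A
  let cands := (A.filter (fun x => decide (0 < x) && !(PySem.Set.contains s (x + 1)))).map (· + 1)
  match PySem.List.min? cands (fun y => y) with
  | some r => r
  | none =>
    match PySem.List.max? A (fun y => y) with
    | some mx => if mx + 1 = 0 then 1 else mx + 1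
    | none => 0  -- unreachable: max([]) raises ValueError (excluded by Pre_)

-- ===== PRECONDITION & SPEC =====
-- Pre_ excludes only the empty list, on which A raises IndexError (a[-1]) and B raises ValueError (max([])).
def Pre_solution (A : List Int) : Prop := A ≠ []
instance (A : List Int) : Decidable (Pre_solution A) := by unfold Pre_solution; infer_instance
def pvWitness_solution : List Int := [1, 3, -2]

def Spec_solution (A : List Int) (out : Int) : Prop := out = solution_alt A
instance (A : List Int) (out : Int) : Decidable (Spec_solution A out) := by unfold Spec_solution; infer_instance

-- ===== CLAIM (what is proved, stated in full; the proofs are below) =====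
def Claim_equal_solution : Prop := ∀ (A : List Int), Dom_solution A → Pre_solution A → Spec_solution A (solution A)

-- ===== LEMMAS AND PROOFS =====

-- candidate values x+1 (x positive, successor absent), as B builds them, phrased over a plain list
def candOf (l : List Int) : List Int :=
  (l.filter (fun x => decide (0 < x) && !(l.contains (x + 1)))).map (· + 1)

-- B's whole computation, phrased over a plain list (no Set)
def altCore (l : List Int) : Int :=
  match PySem.List.min? (candOf l) (fun y => y) with
  | some r => r
  | none =>
    match PySem.List.max? l (fun y => y) with
    | some mx => if mx + 1 = 0 then 1 else mx + 1
    | none => 0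

lemma alt_eq_core (A : List Int) : solution_alt A = altCore A := by
  show (match PySem.List.min?
      ((A.filter (fun x => decide (0 < x) && !(PySem.Set.contains (PySem.Set.ofList A) (x + 1)))).map (· + 1))
      (fun y => y) with
    | some r => r
    | none =>
      match PySem.List.max? A (fun y => y) with
      | some mx => if mx + 1 = 0 then 1 else mx + 1
      | none => 0) = altCore A
  unfold altCore candOf
  rw [List.filter_congr (q := fun x => decide (0 < x) && !(A.contains (x + 1)))
    (fun x _ => by
      have : PySem.Set.contains (PySem.Set.ofList A) (x + 1) = A.contains (x + 1) := by
        simp [PySem.Set.contains_eq_listContains, PySem.Set.mem_ofList]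
      rw [this])]

lemma mem_candOf (l : List Int) (v : Int) :
    v ∈ candOf l ↔ (v - 1 ∈ l ∧ 0 < v - 1 ∧ v ∉ l) := by
  unfold candOf
  simp only [List.mem_map, List.mem_filter, Bool.and_eq_true, decide_eq_true_eq,
    Bool.not_eq_true', List.contains_eq_mem, decide_eq_false_iff_not]
  constructor
  · rintro ⟨x, ⟨hx, h0, hn⟩, rfl⟩
    simpa using ⟨hx, h0, hn⟩
  · rintro ⟨h1, h2, h3⟩
    exact ⟨v - 1, ⟨h1, h2, by simpa using h3⟩, by ring⟩

lemma min?_eq_of_memEquiv (l l' : List Int) (h : ∀ v : Int, v ∈ l ↔ v ∈ l') :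
    PySem.List.min? l (fun y => y) = PySem.List.min? l' (fun y => y) := by
  rcases hl : PySem.List.min? l (fun y => y) with _ | m
  · rcases hl' : PySem.List.min? l' (fun y => y) with _ | m'
    · rfl
    · exfalso
      have hm' := PySem.List.min?_mem hl'
      have hnil : l = [] := (PySem.List.min?_eq_none_iff _ _).mp hl
      exact (List.eq_nil_iff_forall_not_mem.mp hnil m') ((h m').mpr hm')
  · rcases hl' : PySem.List.min? l' (fun y => y) with _ | m'
    · exfalso
      have hm := PySem.List.min?_mem hl
      have hnil : l' = [] := (PySem.List.min?_eq_none_iff _ _).mp hl'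
      exact (List.eq_nil_iff_forall_not_mem.mp hnil m) ((h m).mp hm)
    · have hm := PySem.List.min?_mem hl
      have hm' := PySem.List.min?_mem hl'
      have h1 := PySem.List.min?_isMin hl m' ((h m').mpr hm')
      have h2 := PySem.List.min?_isMin hl' m ((h m).mp hm)
      simp only at h1 h2
      exact congrArg some (le_antisymm h1 h2)

lemma max?_eq_of_memEquiv (l l' : List Int) (h : ∀ v : Int, v ∈ l ↔ v ∈ l') :
    PySem.List.max? l (fun y => y) = PySem.List.max? l' (fun y => y) := by
  rcases hl : PySem.List.max? l (fun y => y) with _ | m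
  · rcases hl' : PySem.List.max? l' (fun y => y) with _ | m'
    · rfl
    · exfalso
      have hm' := PySem.List.max?_mem hl'
      have hnil : l = [] := (PySem.List.max?_eq_none_iff _ _).mp hl
      exact (List.eq_nil_iff_forall_not_mem.mp hnil m') ((h m').mpr hm')
  · rcases hl' : PySem.List.max? l' (fun y => y) with _ | m'
    · exfalso
      have hm := PySem.List.max?_mem hl
      have hnil : l' = [] := (PySem.List.max?_eq_none_iff _ _).mp hl'
      exact (List.eq_nil_iff_forall_not_mem.mp hnil m) ((h m).mp hm)
    · have hm := PySem.List.max?_mem hl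
      have hm' := PySem.List.max?_mem hl'
      have h1 := PySem.List.max?_isMax hl m' ((h m').mpr hm')
      have h2 := PySem.List.max?_isMax hl' m ((h m).mp hm)
      simp only at h1 h2
      exact congrArg some (le_antisymm h2 h1)

lemma altCore_eq_of_memEquiv (l l' : List Int) (h : ∀ v : Int, v ∈ l ↔ v ∈ l') :
    altCore l = altCore l' := by
  unfold altCore
  have hc : ∀ v : Int, v ∈ candOf l ↔ v ∈ candOf l' := by
    intro v
    rw [mem_candOf, mem_candOf, h, h]
  rw [min?_eq_of_memEquiv _ _ hc, max?_eq_of_memEquiv _ _ h]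

lemma max?_cons_eq (x : Int) (t : List Int) (z : Int) (hz : z ∈ t) (hxz : x ≤ z) :
    PySem.List.max? (x :: t) (fun y => y) = PySem.List.max? t (fun y => y) := by
  rcases ht : PySem.List.max? t (fun y => y) with _ | m
  · exact absurd ((PySem.List.max?_eq_none_iff _ _).mp ht ▸ hz) (List.not_mem_nil)
  · rcases hxt : PySem.List.max? (x :: t) (fun y => y) with _ | m'
    · have : (x :: t) = [] := (PySem.List.max?_eq_none_iff _ _).mp hxt
      simp at this
    · have hm := PySem.List.max?_mem ht
      have hm' := PySem.List.max?_mem hxt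
      have h1 : m ≤ m' := by
        have := PySem.List.max?_isMax hxt m (List.mem_cons_of_mem _ hm); simpa using this
      have h2 : m' ≤ m := by
        rcases List.mem_cons.mp hm' with rfl | hmem
        · have hzm := PySem.List.max?_isMax ht z hz; simp only at hzm; omega
        · have := PySem.List.max?_isMax ht m' hmem; simpa using this
      exact congrArg some (le_antisymm h2 h1)

lemma altCore_cons_eq (x y : Int) (rest : List Int) (hxy : x ≤ y)
    (hcand : ∀ v : Int, v ∈ candOf (x :: y :: rest) ↔ v ∈ candOf (y :: rest)) :
    altCore (x :: y :: rest) = altCore (y :: rest) := by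
  unfold altCore
  rw [min?_eq_of_memEquiv _ _ hcand, max?_cons_eq x (y :: rest) y (List.mem_cons_self) hxy]

-- main characterisation of A's loop on a sorted list: it computes B's value
lemma solGo_sorted (a : List Int) (hs : a.Pairwise (· ≤ ·)) (hne : a ≠ []) :
    solGo a = some (altCore a) := by
  induction a with
  | nil => exact absurd rfl hne
  | cons x t ih =>
    cases t with
    | nil =>
      show some (ensureNonZero (x + 1)) = some (altCore [x])
      unfold altCore
      by_cases hx : 0 < x
      · have hc : candOf [x] = [x + 1] := by
          unfold candOf; simp [List.filter, hx]
        rw [hc, PySem.List.min?_id_cons]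
        unfold ensureNonZero
        simp only [List.foldl]
        split
        · omega
        · rfl
      · have hc : candOf [x] = [] := by
          unfold candOf; simp [List.filter, hx]
        rw [hc]
        have hmn : PySem.List.min? ([] : List Int) (fun y => y) = none :=
          (PySem.List.min?_eq_none_iff _ _).mpr rfl
        rw [hmn, PySem.List.max?_id_cons]
        unfold ensureNonZero
        simp only [List.foldl]
    | cons y rest =>
      have hxy : x ≤ y := (List.pairwise_cons.mp hs).1 y (List.mem_cons_self)
      have hyall : ∀ z ∈ y :: rest, y ≤ z := by
        intro z hz
        rcases List.mem_cons.mp hz with rfl | hz'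
        · exact le_refl z
        · exact (List.pairwise_cons.mp (List.pairwise_cons.mp hs).2).1 z hz'
      have hs' : (y :: rest).Pairwise (· ≤ ·) := (List.pairwise_cons.mp hs).2
      have ihne : (y :: rest) ≠ [] := by simp
      show solGo (x :: y :: rest) = _
      unfold solGo
      by_cases h1 : x ≤ 0
      · simp only [if_pos h1]
        rw [ih hs' ihne]
        refine congrArg some (altCore_cons_eq x y rest hxy ?_).symm
        intro v
        rw [mem_candOf, mem_candOf]
        simp only [List.mem_cons]
        constructor
        · rintro ⟨h2, h3, h4⟩
          refine ⟨?_, h3, fun hv => h4 (Or.inr hv)⟩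
          rcases h2 with h2 | h2
          · omega
          · exact h2
        · rintro ⟨h2, h3, h4⟩
          refine ⟨Or.inr h2, h3, ?_⟩
          rintro (rfl | hv)
          · omega
          · exact h4 hv
      · by_cases h2 : x = y
        · simp only [if_neg h1, if_pos h2]
          rw [ih hs' ihne]
          refine congrArg some (altCore_cons_eq x y rest hxy ?_).symm
          subst h2
          intro v
          rw [mem_candOf, mem_candOf]
          simp only [List.mem_cons]
          constructor
          · rintro ⟨h3, h4, h5⟩
            exact ⟨by tauto, h4, fun hv => h5 (Or.inr hv)⟩
          · rintro ⟨h3, h4, h5⟩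
            refine ⟨Or.inr h3, h4, ?_⟩
            rintro (rfl | hv)
            · exact h5 (by tauto)
            · exact h5 hv
        · by_cases h3 : x + 1 ≠ y
          · -- return branch: the minimum candidate is x + 1
            simp only [if_neg h1, if_neg h2, if_pos h3]
            have hy2 : x + 2 ≤ y := by omega
            have hxc : (x + 1) ∈ candOf (x :: y :: rest) := by
              rw [mem_candOf]
              have e : x + 1 - 1 = x := by ring
              rw [e]
              refine ⟨List.mem_cons_self, by omega, ?_⟩
              simp only [List.mem_cons]
              rintro (h | h | h)
              · omega
              · omega
              · have := hyall _ (List.mem_cons_of_mem _ h); omega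
            have hmin : ∀ v ∈ candOf (x :: y :: rest), x + 1 ≤ v := by
              intro v hv
              rw [mem_candOf] at hv
              rcases hv with ⟨hv1, _, _⟩
              rcases List.mem_cons.mp hv1 with h | h
              · omega
              · have := hyall _ h; omega
            rcases hmc : PySem.List.min? (candOf (x :: y :: rest)) (fun y => y) with _ | m
            · exact absurd ((PySem.List.min?_eq_none_iff _ _).mp hmc ▸ hxc) (List.not_mem_nil)
            · have hma : m ≤ x + 1 := by
                have := PySem.List.min?_isMin hmc (x + 1) hxc; simpa using this
              have hmb : x + 1 ≤ m := hmin m (PySem.List.min?_mem hmc)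
              unfold altCore
              rw [hmc]
              show some (ensureNonZero (x + 1)) = some m
              have he : ensureNonZero (x + 1) = x + 1 := by
                unfold ensureNonZero; split <;> omega
              rw [he]
              exact congrArg some (by omega)
          · simp only [if_neg h1, if_neg h2, if_neg h3]
            rw [not_ne_iff] at h3
            rw [ih hs' ihne]
            refine congrArg some (altCore_cons_eq x y rest hxy ?_).symm
            intro v
            rw [mem_candOf, mem_candOf]
            simp only [List.mem_cons]
            constructor
            · rintro ⟨h4, h5, h6⟩
              refine ⟨?_, h5, fun hv => h6 (Or.inr hv)⟩
              rcases h4 with h4 | h4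
              · exfalso; exact h6 (Or.inr (Or.inl (by omega)))
              · exact h4
            · rintro ⟨h4, h5, h6⟩
              refine ⟨Or.inr h4, h5, ?_⟩
              rintro (rfl | hv)
              · rcases h4 with h4 | h4
                · omega
                · have := hyall _ (List.mem_cons_of_mem _ h4); omega
              · exact h6 hv

-- ===== VERDICT (by name: the statement is the Claim_ definition above) =====
theorem solution_spec : Claim_equal_solution := by
  intro A _ hpre
  unfold Spec_solution
  show (match solGo (PySem.List.sorted A (fun x => x) false) with
    | some r => r
    | none => ensureNonZero (((PySem.List.pyGet? (PySem.List.sorted A (fun x => x) false) (-1)).getD 0) + 1))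
    = solution_alt A
  have hne : PySem.List.sorted A (fun x => x) false ≠ [] := by
    intro h
    exact hpre ((PySem.List.sorted_eq_nil_iff _ _ _).mp h)
  have hpw : (PySem.List.sorted A (fun x => x) false).Pairwise (· ≤ ·) :=
    PySem.List.sorted_pairwise A (fun x => x)
  rw [solGo_sorted _ hpw hne]
  rw [alt_eq_core]
  exact altCore_eq_of_memEquiv _ _ (fun v => (PySem.List.sorted_perm A (fun x => x) false).mem_iff)
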